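-- pv_equiv track=rewrite | github.com/choiyunh/WALK-A-DAY | Programmers/Practice/Level2/야간전술보행.py | solution
-- ===== SOURCE A (Python) =====
-- def solution(distance, scope, times):
--     answer = distance
--     for i in range(len(scope)):
--         if scope[i][0] > scope[i][1]:
--             scope[i].sort()
--         for j in range(scope[i][0], scope[i][1] + 1):
--             if 1 <= (j % (times[i][0] + times[i][1])) < times[i][0] + 1:
--                 if answer > j:
--                     answer = j
--     return answer
-- ===== SOURCE B (Python) =====
-- def solution(distance, scope, times):
--     # per camera, compute the first watched position by modular arithmetic (no inner scan)
--     # (Unlike A, this does not sort scope's rows in place.)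
--     best = distance
--     for i in range(len(scope)):
--         s, t = scope[i], times[i]
--         if s[0] <= s[1]:
--             a, b = s[0], s[1]
--         else:
--             srt = sorted(s)
--             a, b = srt[0], srt[1]
--         w = t[0]
--         p = t[0] + t[1]
--         if p < 2 or w < 1:
--             continue  # no position j satisfies 1 <= j % p <= w
--         r0 = a % p
--         first = a if 1 <= r0 <= w else a + (1 - r0) % p
--         if first <= b:
--             best = min(best, first)
--     return best
-- ===== Notes on version B (the rewrite author's own statement) =====
-- stated objective: alternative
-- what changed: Instead of scanning every position j in each camera's range and testing j % period, B computes each camera's first watched position in closed form with two modular operations and keeps the minimum, removing the inner scan; measured speed on the check's input family was inconsistent, so no speed is claimed.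
import Mathlib
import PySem

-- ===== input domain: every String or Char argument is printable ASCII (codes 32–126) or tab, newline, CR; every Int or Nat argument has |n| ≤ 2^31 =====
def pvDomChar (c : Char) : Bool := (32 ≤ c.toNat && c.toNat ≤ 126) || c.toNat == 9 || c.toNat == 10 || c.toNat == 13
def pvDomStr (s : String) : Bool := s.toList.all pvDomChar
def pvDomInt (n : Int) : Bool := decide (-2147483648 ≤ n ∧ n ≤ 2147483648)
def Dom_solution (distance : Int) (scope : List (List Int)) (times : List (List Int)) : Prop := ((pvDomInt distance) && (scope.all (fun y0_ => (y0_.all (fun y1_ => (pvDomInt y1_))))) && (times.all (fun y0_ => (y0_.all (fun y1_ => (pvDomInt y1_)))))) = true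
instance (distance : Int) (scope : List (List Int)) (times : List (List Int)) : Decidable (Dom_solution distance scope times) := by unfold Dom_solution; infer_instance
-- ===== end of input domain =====

-- B replaces A's scan of every position in each camera's range by a closed-form
-- (two modular operations) first-watched position per camera; return values agree on
-- Pre_. (A sorts scope's rows in place when reversed; B does not mutate its arguments —
-- the equivalence proved here is about the return value only.)

-- ===== PORT A =====
def solution (distance : Int) (scope : List (List Int)) (times : List (List Int)) : Int :=
  (PySem.List.pyRange 0 scope.length 1).foldl (fun answer i =>
    let row0 := PySem.List.pyGetD scope i []
    -- scope[i].sort() : only the sorted row (read back as scope[i]) matters for the result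
    let row := if PySem.List.pyGetD row0 0 0 > PySem.List.pyGetD row0 1 0
               then PySem.List.sorted row0 (fun x => x) false else row0
    let t := PySem.List.pyGetD times i []
    (PySem.List.pyRange (PySem.List.pyGetD row 0 0) (PySem.List.pyGetD row 1 0 + 1) 1).foldl
      (fun ans j =>
        if 1 ≤ PySem.Int.mod j (PySem.List.pyGetD t 0 0 + PySem.List.pyGetD t 1 0) ∧
           PySem.Int.mod j (PySem.List.pyGetD t 0 0 + PySem.List.pyGetD t 1 0) < PySem.List.pyGetD t 0 0 + 1
        then (if ans > j then j else ans) else ans) answer) distance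

-- ===== PORT B =====
def solution_alt (distance : Int) (scope : List (List Int)) (times : List (List Int)) : Int :=
  (PySem.List.pyRange 0 scope.length 1).foldl (fun best i =>
    let s := PySem.List.pyGetD scope i []
    let t := PySem.List.pyGetD times i []
    let ab := if PySem.List.pyGetD s 0 0 ≤ PySem.List.pyGetD s 1 0
              then (PySem.List.pyGetD s 0 0, PySem.List.pyGetD s 1 0)
              else
                let srt := PySem.List.sorted s (fun x => x) false
                (PySem.List.pyGetD srt 0 0, PySem.List.pyGetD srt 1 0)
    let w := PySem.List.pyGetD t 0 0
    let p := PySem.List.pyGetD t 0 0 + PySem.List.pyGetD t 1 0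
    if p < 2 ∨ w < 1 then best
    else
      let r0 := PySem.Int.mod ab.1 p
      let first := if 1 ≤ r0 ∧ r0 ≤ w then ab.1 else ab.1 + PySem.Int.mod (1 - r0) p
      if first ≤ ab.2 then min best first else best) distance

-- ===== PRECONDITION & SPEC =====
-- Pre_ excludes exactly the inputs on which Python A raises: an index error
-- (a scope/times row shorter than 2, or times shorter than scope) or a
-- ZeroDivisionError (times[i][0] + times[i][1] == 0).
def Pre_solution (distance : Int) (scope : List (List Int)) (times : List (List Int)) : Prop :=
  scope.length ≤ times.length ∧
  ∀ st ∈ scope.zip times, 2 ≤ st.1.length ∧ 2 ≤ st.2.length ∧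
    st.2.getD 0 0 + st.2.getD 1 0 ≠ 0
instance (distance : Int) (scope : List (List Int)) (times : List (List Int)) : Decidable (Pre_solution distance scope times) := by unfold Pre_solution; infer_instance
def pvWitness_solution : Int × List (List Int) × List (List Int) := (10, [[3, 5]], [[1, 1]])

def Spec_solution (distance : Int) (scope : List (List Int)) (times : List (List Int)) (out : Int) : Prop := out = solution_alt distance scope times
instance (distance : Int) (scope : List (List Int)) (times : List (List Int)) (out : Int) : Decidable (Spec_solution distance scope times out) := by unfold Spec_solution; infer_instance

-- ===== CLAIM (what is proved, stated in full; the proofs are below) =====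
def Claim_equal_solution : Prop := ∀ (distance : Int) (scope : List (List Int)) (times : List (List Int)), Dom_solution distance scope times → Pre_solution distance scope times → Spec_solution distance scope times (solution distance scope times)

-- ===== LEMMAS AND PROOFS =====

-- the first position ≥ a whose residue mod p lies in [1, w]  (B's closed form)
def firstW (w p a : Int) : Int :=
  if 1 ≤ PySem.Int.mod a p ∧ PySem.Int.mod a p ≤ w then a
  else a + PySem.Int.mod (1 - PySem.Int.mod a p) p

-- A's inner-loop step
def stepA (w p ans j : Int) : Int :=
  if 1 ≤ PySem.Int.mod j p ∧ PySem.Int.mod j p < w + 1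
  then (if ans > j then j else ans) else ans

lemma firstW_ge (w p a : Int) (hp : 0 < p) : a ≤ firstW w p a := by
  unfold firstW
  split
  · exact le_refl a
  · have := PySem.Int.mod_nonneg (1 - PySem.Int.mod a p) hp
    omega

lemma emod_one_sub (p x : Int) (hp : 2 ≤ p) (h0 : 0 ≤ x) (h1 : x < p) :
    (1 - x) % p = if x ≤ 1 then 1 - x else 1 - x + p := by
  split
  · exact Int.emod_eq_of_lt (by omega) (by omega)
  · conv_lhs => rw [show (1 - x) = (1 - x + p) + p * (-1) by ring]
    rw [Int.add_mul_emod_self_left]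
    exact Int.emod_eq_of_lt (by omega) (by omega)

lemma emod_succ (p a : Int) (hp : 2 ≤ p) :
    (a + 1) % p = if a % p + 1 = p then 0 else a % p + 1 := by
  have hr0l : 0 ≤ a % p := Int.emod_nonneg a (by omega)
  have hr0u : a % p < p := Int.emod_lt_of_pos a (by omega)
  conv_lhs => rw [Int.add_emod]
  rw [show (1:Int) % p = 1 from Int.emod_eq_of_lt (by omega) (by omega)]
  split
  · next h => rw [h, Int.emod_self]
  · exact Int.emod_eq_of_lt (by omega) (by omega)

lemma firstW_succ (w p a : Int) (hp : 2 ≤ p) (hw : 1 ≤ w)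
    (h : ¬ (1 ≤ PySem.Int.mod a p ∧ PySem.Int.mod a p < w + 1)) :
    firstW w p (a + 1) = firstW w p a := by
  have hp0 : (0:Int) < p := by omega
  have hr0l : 0 ≤ a % p := Int.emod_nonneg a (by omega)
  have hr0u : a % p < p := Int.emod_lt_of_pos a hp0
  unfold firstW
  simp only [PySem.Int.mod_eq_emod_of_pos hp0] at h ⊢
  rw [emod_succ p a hp]
  by_cases hend : a % p + 1 = p
  · rw [if_pos hend, emod_one_sub p 0 hp (le_refl 0) (by omega),
        emod_one_sub p (a % p) hp hr0l hr0u]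
    split_ifs <;> omega
  · rw [if_neg hend, emod_one_sub p (a % p + 1) hp (by omega) (by omega),
        emod_one_sub p (a % p) hp hr0l hr0u]
    split_ifs <;> omega

-- A's inner scan over [a, b] computes the min with B's closed-form first watched position
lemma inner_main (w p : Int) (hp : 2 ≤ p) (hw : 1 ≤ w) :
    ∀ (n : Nat) (a ans b : Int), (b + 1 - a).toNat = n →
      (PySem.List.pyRange a (b + 1) 1).foldl (stepA w p) ans =
        (if firstW w p a ≤ b then min ans (firstW w p a) else ans) := by
  intro n
  induction n with
  | zero =>
    intro a ans b hn
    rw [PySem.List.pyRange_one_eq_nil (by omega), List.foldl_nil]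
    have := firstW_ge w p a (by omega)
    rw [if_neg (by omega)]
  | succ m ih =>
    intro a ans b hn
    rw [PySem.List.pyRange_one_cons (by omega : a < b + 1), List.foldl_cons,
        ih (a + 1) (stepA w p ans a) b (by omega)]
    have hfa1 : a + 1 ≤ firstW w p (a + 1) := firstW_ge w p (a + 1) (by omega)
    by_cases hc : 1 ≤ PySem.Int.mod a p ∧ PySem.Int.mod a p < w + 1
    · -- a is watched: firstW a = a, and the whole result is min ans a
      have hfa : firstW w p a = a := by unfold firstW; rw [if_pos ⟨hc.1, by omega⟩]
      have hstep : stepA w p ans a = if ans > a then a else ans := by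
        unfold stepA; rw [if_pos hc]
      have e1 : (if ans > a then a else ans) = min ans a := by split <;> omega
      rw [hstep, hfa, e1]
      have e2 : min (min ans a) (firstW w p (a + 1)) = min ans a := by omega
      rw [e2, ite_self, if_pos (show a ≤ b by omega)]
    · -- a is not watched: the step is a no-op and firstW (a+1) = firstW a
      have hstep : stepA w p ans a = ans := by unfold stepA; rw [if_neg hc]
      rw [hstep, firstW_succ w p a hp hw hc]

-- when p < 2 or w < 1 (and p ≠ 0), no position is watched: A's inner scan is a no-op
lemma inner_dead (w p : Int) (hp0 : p ≠ 0) (h : p < 2 ∨ w < 1) :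
    ∀ (l : List Int) (ans : Int), l.foldl (stepA w p) ans = ans := by
  intro l
  induction l with
  | nil => intro ans; rfl
  | cons j l ihl =>
    intro ans
    rw [List.foldl_cons]
    have hstep : stepA w p ans j = ans := by
      unfold stepA
      rw [if_neg]
      rintro ⟨h1, h2⟩
      rcases lt_trichotomy p 0 with hneg | hz | hpos
      · have := PySem.Int.mod_neg_bounds j hneg; omega
      · exact hp0 hz
      · have hnn := PySem.Int.mod_nonneg j hpos
        have hlt := PySem.Int.mod_lt j hpos
        omega
    rw [hstep, ihl]

-- one camera: A's scan of [a, b] equals B's closed-form branch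
lemma inner_eq (w p a b ans : Int) (hpne : p ≠ 0) :
    (PySem.List.pyRange a (b + 1) 1).foldl (stepA w p) ans =
      (if p < 2 ∨ w < 1 then ans
       else if firstW w p a ≤ b then min ans (firstW w p a) else ans) := by
  by_cases hdead : p < 2 ∨ w < 1
  · rw [if_pos hdead]
    exact inner_dead w p hpne hdead _ ans
  · rw [if_neg hdead]
    exact inner_main w p (by omega) (by omega) (b + 1 - a).toNat a ans b rfl

-- ===== VERDICT (by name: the statement is the Claim_ definition above) =====
theorem solution_spec : Claim_equal_solution := by
  intro distance scope times _hdom hpre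
  unfold Spec_solution solution solution_alt
  obtain ⟨hlen, hrows⟩ := hpre
  apply PySem.List.foldl_congr_mem
  intro acc i hi
  have hi' := (PySem.List.mem_pyRange_one).1 hi
  have hiS : i.toNat < scope.length := by omega
  have hiT : i.toNat < times.length := by omega
  have hmem : (scope[i.toNat], times[i.toNat]) ∈ scope.zip times := by
    have hz : (scope.zip times)[i.toNat]'(by rw [List.length_zip]; omega) =
        (scope[i.toNat], times[i.toNat]) := List.getElem_zip
    exact hz ▸ List.getElem_mem _
  obtain ⟨hs2, ht2, hptz⟩ := hrows _ hmem
  simp only at hs2 ht2 hptz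
  have hgs : PySem.List.pyGetD scope i [] = scope[i.toNat] :=
    PySem.List.pyGetD_eq_getElem _ _ hi'.1 (by omega)
  have hgt : PySem.List.pyGetD times i [] = times[i.toNat] :=
    PySem.List.pyGetD_eq_getElem _ _ hi'.1 (by omega)
  dsimp only
  rw [hgs, hgt]
  set s := scope[i.toNat] with hs
  set t := times[i.toNat] with ht
  have hgt0 : PySem.List.pyGetD t 0 0 = t.getD 0 0 := by
    rw [show (0:Int) = ((0:Nat):Int) by rfl, PySem.List.pyGetD_natCast]
  have hgt1 : PySem.List.pyGetD t 1 0 = t.getD 1 0 := by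
    rw [show (1:Int) = ((1:Nat):Int) by rfl, PySem.List.pyGetD_natCast]
  have hpne : PySem.List.pyGetD t 0 0 + PySem.List.pyGetD t 1 0 ≠ 0 := by
    rw [hgt0, hgt1]; exact hptz
  by_cases hcmp : PySem.List.pyGetD s 0 0 > PySem.List.pyGetD s 1 0
  · rw [if_pos hcmp,
        if_neg (show ¬(PySem.List.pyGetD s 0 0 ≤ PySem.List.pyGetD s 1 0) by omega)]
    exact inner_eq (PySem.List.pyGetD t 0 0)
      (PySem.List.pyGetD t 0 0 + PySem.List.pyGetD t 1 0)
      (PySem.List.pyGetD (PySem.List.sorted s (fun x => x) false) 0 0)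
      (PySem.List.pyGetD (PySem.List.sorted s (fun x => x) false) 1 0) acc hpne
  · rw [if_neg hcmp,
        if_pos (show PySem.List.pyGetD s 0 0 ≤ PySem.List.pyGetD s 1 0 by omega)]
    exact inner_eq (PySem.List.pyGetD t 0 0)
      (PySem.List.pyGetD t 0 0 + PySem.List.pyGetD t 1 0)
      (PySem.List.pyGetD s 0 0) (PySem.List.pyGetD s 1 0) acc hpne
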